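-- pv_equiv track=rewrite | github.com/OMPSHUNYAYA/Structural-Infinity-Transform | scripts/ssit_phase2_robust_v2.py | compute_ds_upto_sqrt
-- ===== SOURCE A (Python) =====
-- import math
--
-- def factorize(n: int, spf):
--     fs = []
--     while n > 1:
--         p = spf[n]
--         e = 0
--         while n % p == 0:
--             n //= p
--             e += 1
--         fs.append((p, e))
--     return fs
--
-- def gen_divisors_from_factors(factors):
--     divs = [1]
--     for p, e in factors:
--         base = list(divs)
--         pe = 1
--         for _ in range(e):
--             pe *= p
--             for d in base:
--                 divs.append(d * pe)
--     return divs
--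
-- def compute_ds_upto_sqrt(n: int, spf):
--     L = int(math.isqrt(n))
--     fs = factorize(n, spf)
--     divs = gen_divisors_from_factors(fs)
--     ds = []
--     for d in divs:
--         if 2 <= d <= L:
--             ds.append(d)
--     ds.sort()
--     return ds, L
-- ===== SOURCE B (Python) =====
-- import math
--
-- def compute_ds_upto_sqrt(n: int, spf):
--     L = math.isqrt(n)
--     # prime multiset of n via the spf chain, one division per step
--     cnt = {}
--     m = n
--     while m > 1:
--         p = spf[m]
--         cnt[p] = cnt.get(p, 0) + 1
--         m //= p
--     # depth-first search over exponent choices, pruned at the bound L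
--     ds = []
--     def go(pes, prod):
--         if prod > L:
--             return
--         if not pes:
--             if prod >= 2:
--                 ds.append(prod)
--             return
--         p, e = pes[0]
--         for k in range(e + 1):
--             go(pes[1:], prod * p ** k)
--     go(list(cnt.items()), 1)
--     ds.sort()
--     return ds, L
-- ===== Notes on version B (the rewrite author's own statement) =====
-- stated objective: alternative
-- what changed: A factorizes with two nested stripping loops into a (prime, exponent) list, multiplies out ALL divisors of n power-block by power-block (snapshot copy + running prime power), then filters to [2, isqrt(n)] and sorts in place; B walks the spf chain one division per step counting entries in a plain dict, and collects only the divisors up to isqrt(n) by a recursive depth-first search over exponent choices that prunes every partial product exceeding the bound, sorting the collected list once; …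
-- outside the precondition, e.g. on compute_ds_upto_sqrt(4, [0, 0, 2, 3, 4]): A returns ([], 2), B returns ([], 2); on compute_ds_upto_sqrt(4, [0, 0, 1, 0, 2]): A returns ([2], 2), B does not finish within the time limit
import Mathlib
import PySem

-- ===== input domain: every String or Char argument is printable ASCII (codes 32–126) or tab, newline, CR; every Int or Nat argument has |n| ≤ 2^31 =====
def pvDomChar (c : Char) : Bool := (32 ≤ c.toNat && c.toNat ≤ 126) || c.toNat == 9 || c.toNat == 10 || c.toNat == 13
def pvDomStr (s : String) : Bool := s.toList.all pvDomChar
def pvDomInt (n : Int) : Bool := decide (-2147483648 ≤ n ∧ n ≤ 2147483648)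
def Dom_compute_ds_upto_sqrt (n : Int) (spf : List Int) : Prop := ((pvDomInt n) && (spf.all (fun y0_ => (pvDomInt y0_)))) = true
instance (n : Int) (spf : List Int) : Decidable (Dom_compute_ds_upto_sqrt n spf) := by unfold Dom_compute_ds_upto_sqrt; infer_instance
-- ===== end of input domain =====

-- B replaces A's nested stripping loops + generate-ALL-divisors-then-filter + in-place sort by a
-- one-division-per-step spf chain into a dict counter and a recursive depth-first search over
-- exponent choices pruned at isqrt(n); equal on valid spf tables (Pre_), no speed claim.

-- ===== PORT A =====
-- inner 'while n % p == 0' loop of factorize; fuel only makes the loop total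
-- (Python raises ZeroDivisionError at p = 0 and diverges where the fuel runs out: outside Pre_)
def pvInner (fuel : Nat) (n p e : Int) : Option (Int × Int) :=
  match fuel with
  | 0 => none
  | f + 1 =>
    if p = 0 then none
    else if PySem.Int.mod n p = 0 then pvInner f (PySem.Int.floordiv n p) p (e + 1)
    else some (n, e)

-- outer 'while n > 1' loop of factorize; pyGet? none = IndexError (outside Pre_)
def pvFactLoop (fuel : Nat) (n : Int) (spf : List Int) (fs : List (Int × Int)) :
    Option (List (Int × Int)) :=
  match fuel with
  | 0 => none
  | f + 1 =>
    if 1 < n then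
      match PySem.List.pyGet? spf n with
      | none => none
      | some p =>
        match pvInner (n.toNat + 1) n p 0 with
        | none => none
        | some (n', e) => pvFactLoop f n' spf (fs ++ [(p, e)])
    else some fs

-- one '(p, e)' step of gen_divisors_from_factors: base = list(divs); pe *= p; append d*pe
def pvGenStep (divs : List Int) (p e : Int) : List Int :=
  ((List.range e.toNat).foldl
    (fun (st : List Int × Int) _ =>
      let pe := st.2 * p
      (st.1 ++ divs.map (fun d => d * pe), pe))
    (divs, 1)).1

def pvGenDivisors (factors : List (Int × Int)) : List Int :=
  factors.foldl (fun divs pe => pvGenStep divs pe.1 pe.2) [1]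

def compute_ds_upto_sqrt (n : Int) (spf : List Int) : List Int × Int :=
  let L : Int := (Nat.sqrt n.toNat : Int)   -- int(math.isqrt(n)); n < 0 raises (outside Pre_)
  match pvFactLoop (n.toNat + 1) n spf [] with
  | none => ([], L)   -- Python raised or diverged here: outside Pre_
  | some fs =>
    let divs := pvGenDivisors fs
    let ds := divs.foldl (fun ds d => if 2 ≤ d ∧ d ≤ L then ds ++ [d] else ds) []
    (PySem.List.sorted ds (fun x => x) false, L)

-- ===== PORT B =====
-- B's 'while m > 1' chain: one division per step, counting each table entry in a dict;
-- fuel only makes the loop total (Python raises or diverges where it returns none: outside Pre_)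
def pvChain (fuel : Nat) (m : Int) (spf : List Int) (cnt : PySem.Dict Int Int) :
    Option (PySem.Dict Int Int) :=
  match fuel with
  | 0 => none
  | f + 1 =>
    if 1 < m then
      match PySem.List.pyGet? spf m with
      | none => none
      | some p =>
        if p = 0 then none
        else pvChain f (PySem.Int.floordiv m p) spf (cnt.insert p (cnt.getD p 0 + 1))
    else some cnt

-- B's recursive 'go(pes, prod)': DFS over exponent choices, pruned at prod > L;
-- 'ds.append' is the accumulator
def pvGo (L : Int) : List (Int × Int) → Int → List Int → List Int
  | [], prod, ds => if L < prod then ds else if 2 ≤ prod then ds ++ [prod] else ds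
  | (p, e) :: tl, prod, ds =>
    if L < prod then ds
    else (PySem.List.pyRange 0 (e + 1) 1).foldl
      (fun acc k => pvGo L tl (prod * p ^ k.toNat) acc) ds

def compute_ds_upto_sqrt_alt (n : Int) (spf : List Int) : List Int × Int :=
  let L : Int := (Nat.sqrt n.toNat : Int)   -- math.isqrt(n); n < 0 raises (outside Pre_)
  match pvChain (n.toNat + 1) n spf PySem.Dict.empty with
  | none => ([], L)   -- Python raised or diverged here: outside Pre_
  | some cnt =>
    (PySem.List.sorted (pvGo L cnt.items 1 []) (fun x => x) false, L)

-- ===== PRECONDITION & SPEC =====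
-- spf is a contract input: a least-prime-factor table for n. Pre_ excludes n < 0 (math.isqrt
-- raises ValueError) and malformed tables (too short, or wrong at an index dividing n — the
-- only entries read): on those A raises IndexError or ZeroDivisionError, diverges, or both
-- programs merely propagate the bad entries (garbage in, garbage out; no intended value exists).
-- 'spf is right at index m': in range, and the entry is the least divisor ≥ 2 of m
def pvEntryOk (spf : List Int) (m : Nat) : Bool :=
  decide (m < spf.length) && decide (2 ≤ spf.getD m 0) &&
    decide ((spf.getD m 0).toNat ∣ m) &&
    decide (∀ q < (spf.getD m 0).toNat, 2 ≤ q → ¬ q ∣ m)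

def Pre_compute_ds_upto_sqrt (n : Int) (spf : List Int) : Prop :=
  0 ≤ n ∧ (n < 2 ∨ ((n < (spf.length : Int)) ∧
    ∀ m < spf.length, 2 ≤ m → m ∣ n.toNat → pvEntryOk spf m = true))
instance (n : Int) (spf : List Int) : Decidable (Pre_compute_ds_upto_sqrt n spf) := by
  unfold Pre_compute_ds_upto_sqrt; infer_instance

def pvWitness_compute_ds_upto_sqrt : Int × List Int := (4, [0, 0, 2, 3, 2])

def Spec_compute_ds_upto_sqrt (n : Int) (spf : List Int) (out : List Int × Int) : Prop := out = compute_ds_upto_sqrt_alt n spf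
instance (n : Int) (spf : List Int) (out : List Int × Int) : Decidable (Spec_compute_ds_upto_sqrt n spf out) := by unfold Spec_compute_ds_upto_sqrt; infer_instance

-- ===== CLAIM (what is proved, stated in full; the proofs are below) =====
def Claim_equal_compute_ds_upto_sqrt : Prop := ∀ (n : Int) (spf : List Int), Dom_compute_ds_upto_sqrt n spf → Pre_compute_ds_upto_sqrt n spf → Spec_compute_ds_upto_sqrt n spf (compute_ds_upto_sqrt n spf)

-- ===== LEMMAS AND PROOFS =====

def pvProdPow (fs : List (Nat × Nat)) : Nat := (fs.map (fun pe => pe.1 ^ pe.2)).prod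

def pvLift (fs : List (Nat × Nat)) : List (Int × Int) :=
  fs.map (fun pe => ((pe.1 : Int), (pe.2 : Int)))

def pvC (xs : List Nat) : List Int := xs.map Int.ofNat

def pvD (init : List Nat) (p j : Nat) : List Nat :=
  init ++ (List.range j).flatMap (fun k => init.map (fun d => d * p ^ (k + 1)))

theorem pvInner_spec (p : Nat) (hp : 2 ≤ p) :
    ∀ (fuel N : Nat) (e : Int), 1 ≤ N → N < fuel →
      ∃ (k M : Nat), pvInner fuel (N : Int) (p : Int) e = some ((M : Int), e + (k : Int)) ∧
        N = p ^ k * M ∧ ¬ p ∣ M ∧ 1 ≤ M := by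
  intro fuel
  induction fuel with
  | zero => intro N e h1 h2; omega
  | succ f ih =>
    intro N e h1 h2
    by_cases hd : p ∣ N
    · have hple : p ≤ N := Nat.le_of_dvd (by omega) hd
      have h1' : 1 ≤ N / p := (Nat.one_le_div_iff (by omega)).2 hple
      have h2' : N / p < f := lt_of_lt_of_le (Nat.div_lt_self (by omega) (by omega)) (by omega)
      obtain ⟨k, M, hrec, hNM, hpM, hM1⟩ := ih (N / p) (e + 1) h1' h2'
      refine ⟨k + 1, M, ?_, ?_, hpM, hM1⟩
      · have hmod : PySem.Int.mod (N : Int) (p : Int) = 0 :=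
          (PySem.Int.mod_eq_zero_iff_dvd _ _).2 (by exact_mod_cast hd)
        have hp0 : ((p : Int)) ≠ 0 := by positivity
        simp only [pvInner, if_neg hp0, if_pos hmod, PySem.Int.floordiv_natCast]
        rw [hrec]
        congr 2
        push_cast
        ring
      · have : N = p * (N / p) := (Nat.mul_div_cancel' hd).symm
        rw [this, hNM]; ring
    · refine ⟨0, N, ?_, by simp, hd, h1⟩
      have hnd : ¬ ((p : Int) ∣ (N : Int)) := by exact_mod_cast hd
      have hmod : PySem.Int.mod (N : Int) (p : Int) ≠ 0 := by
        simpa [PySem.Int.mod_eq_zero_iff_dvd] using hnd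
      have hp0 : ((p : Int)) ≠ 0 := by positivity
      simp only [pvInner, if_neg hp0, if_neg hmod]
      simp

theorem pvFactLoop_spec (spf : List Int) (N0 : Nat)
    (hv : ∀ m, 2 ≤ m → m ∣ N0 →
      m < spf.length ∧ spf.getD m 0 = ((Nat.minFac m : Nat) : Int)) :
    ∀ (fuel N : Nat) (acc : List (Int × Int)), 1 ≤ N → N < fuel → N ∣ N0 →
      ∃ fs : List (Nat × Nat),
        pvFactLoop fuel (N : Int) spf acc = some (acc ++ pvLift fs) ∧
        pvProdPow fs = N ∧ (∀ pe ∈ fs, pe.1.Prime ∧ 1 ≤ pe.2 ∧ pe.1 ∣ N) ∧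
        (fs.map Prod.fst).Nodup := by
  intro fuel
  induction fuel with
  | zero => intro N acc h1 h2; omega
  | succ f ih =>
    intro N acc h1 h2 hdvd0
    by_cases hN : 2 ≤ N
    · have hlt : (1 : Int) < (N : Int) := by exact_mod_cast hN
      obtain ⟨hlen', hval⟩ := hv N hN hdvd0
      set p := N.minFac with hpdef
      have hpp : p.Prime := Nat.minFac_prime (by omega)
      have hget : PySem.List.pyGet? spf ((N : Nat) : Int) = some ((p : Nat) : Int) := by
        rw [PySem.List.pyGet?_natCast, List.getElem?_eq_getElem hlen']
        rw [← List.getD_eq_getElem spf 0 hlen', hval]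
      obtain ⟨k, M, hinner, hNM, hpM, hM1⟩ :=
        pvInner_spec p hpp.two_le (N + 1) N 0 h1 (by omega)
      have hk1 : 1 ≤ k := by
        rcases Nat.eq_zero_or_pos k with hk | hk
        · exfalso; apply hpM
          rw [hk, pow_zero, one_mul] at hNM
          subst hNM
          exact Nat.minFac_dvd N
        · exact hk
      have h2pk : 1 < p ^ k := Nat.one_lt_pow (by omega) hpp.one_lt
      have hM_lt : M < N := by
        have := Nat.mul_lt_mul_of_pos_right h2pk (show 0 < M by omega)
        simpa [hNM.symm] using this
      obtain ⟨fs', hrec, hprod, hmem, hnd⟩ :=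
        ih M (acc ++ [((p : Int), (0 : Int) + (k : Int))]) hM1 (by omega)
          ((Dvd.intro_left _ hNM.symm).trans hdvd0)
      refine ⟨(p, k) :: fs', ?_, ?_, ?_, ?_⟩
      · simp only [pvFactLoop, if_pos hlt, hget, Int.toNat_natCast, hinner, hrec]
        simp [pvLift]
      · simp only [pvProdPow, List.map_cons, List.prod_cons]
        rw [show ((fs'.map fun pe => pe.1 ^ pe.2).prod) = M from hprod, ← hNM]
      · intro pe hpe
        rcases List.mem_cons.1 hpe with h | h
        · subst h
          exact ⟨hpp, hk1, (dvd_pow_self p (by omega)).trans (hNM ▸ dvd_mul_right _ _)⟩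
        · obtain ⟨h1', h2', h3'⟩ := hmem pe h
          exact ⟨h1', h2', h3'.trans ⟨p ^ k, by rw [hNM]; ring⟩⟩
      · simp only [List.map_cons, List.nodup_cons]
        refine ⟨?_, hnd⟩
        intro hmem'
        obtain ⟨pe, hpe, hfst⟩ := List.mem_map.1 hmem'
        exact hpM (hfst ▸ (hmem pe hpe).2.2)
    · have hN1 : N = 1 := by omega
      subst hN1
      refine ⟨[], ?_, by simp [pvProdPow], by simp, by simp⟩
      simp [pvFactLoop, pvLift]

theorem pvC_append (a b : List Nat) : pvC (a ++ b) = pvC a ++ pvC b := List.map_append ..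

theorem mem_pvC (xs : List Nat) (y : Int) : y ∈ pvC xs ↔ ∃ x ∈ xs, (x : Int) = y := by
  simp [pvC, Int.ofNat_eq_natCast]

theorem nodup_pvC (xs : List Nat) (h : xs.Nodup) : (pvC xs).Nodup :=
  h.map (fun a b hab => by simpa [Int.ofNat_eq_natCast, Int.natCast_inj] using congrArg id hab)

-- divisor lists accumulated after j inner iterations of a gen step

theorem pvGenStep_fold (init : List Nat) (p : Nat) :
    ∀ j : Nat,
      (List.range j).foldl
        (fun (st : List Int × Int) _ =>
          let pe := st.2 * (p : Int)
          (st.1 ++ (pvC init).map (fun d => d * pe), pe))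
        (pvC init, 1)
      = (pvC (pvD init p j), ((p ^ j : Nat) : Int)) := by
  intro j
  induction j with
  | zero => simp [pvD, pvC]
  | succ j ih =>
    rw [List.range_succ, List.foldl_append, ih]
    simp only [List.foldl_cons, List.foldl_nil, Prod.mk.injEq]
    refine ⟨?_, by push_cast; ring⟩
    rw [show pvD init p (j + 1) = pvD init p j ++ init.map (fun d => d * p ^ (j + 1)) by
          simp [pvD, List.range_succ, List.append_assoc]]
    rw [pvC_append]
    congr 1
    simp only [pvC, List.map_map]
    apply List.map_congr_left
    intro d _
    simp only [Function.comp_apply, Int.ofNat_eq_natCast]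
    push_cast
    ring

theorem mem_pvD (init : List Nat) (p e M : Nat) (hp : p.Prime)
    (hinit : ∀ x, x ∈ init ↔ x ∣ M) (x : Nat) :
    x ∈ pvD init p e ↔ x ∣ M * p ^ e := by
  simp only [pvD, List.mem_append, List.mem_flatMap, List.mem_range, List.mem_map]
  constructor
  · rintro (hx | ⟨k, hk, d, hd, rfl⟩)
    · exact dvd_mul_of_dvd_left ((hinit x).1 hx) _
    · exact mul_dvd_mul ((hinit d).1 hd) (pow_dvd_pow p (by omega))
  · intro hx
    obtain ⟨a, b, ha, hb, rfl⟩ := exists_dvd_and_dvd_of_dvd_mul hx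
    obtain ⟨k, hk, rfl⟩ := (Nat.dvd_prime_pow hp).1 hb
    cases k with
    | zero => left; rw [pow_zero, mul_one]; exact (hinit a).2 ha
    | succ k => right; exact ⟨k, by omega, a, (hinit a).2 ha, rfl⟩

theorem nodup_pvD (init : List Nat) (p e M : Nat) (hp : p.Prime) (hpM : ¬ p ∣ M)
    (hinit : ∀ x ∈ init, x ∣ M) (hnd : init.Nodup) : (pvD init p e).Nodup := by
  have hnotp : ∀ x ∈ init, ¬ p ∣ x := fun x hx hdvd => hpM (hdvd.trans (hinit x hx))
  have hcancel : ∀ (d1 d2 k1 k2 : Nat), k1 < k2 → d1 ∈ init →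
      d1 * p ^ (k1 + 1) = d2 * p ^ (k2 + 1) → False := by
    intro d1 d2 k1 k2 hlt hd1 heq
    apply hnotp d1 hd1
    have hpow : p ^ (k2 + 1) = p ^ (k2 - k1) * p ^ (k1 + 1) := by
      rw [← pow_add]; congr 1; omega
    rw [hpow, ← mul_assoc] at heq
    have := Nat.eq_of_mul_eq_mul_right (pow_pos hp.pos (k1 + 1)) heq
    rw [this]
    exact Dvd.dvd.mul_left (dvd_pow_self p (by omega)) d2
  rw [pvD, List.nodup_append]
  refine ⟨hnd, ?_, ?_⟩
  · rw [List.nodup_flatMap]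
    constructor
    · intro k _
      exact hnd.map (fun a b hab =>
        Nat.eq_of_mul_eq_mul_right (pow_pos hp.pos (k + 1)) hab)
    · apply List.Pairwise.imp ?_ (List.pairwise_lt_range)
      intro k1 k2 hlt y hy1 hy2
      obtain ⟨d1, hd1, rfl⟩ := List.mem_map.1 hy1
      obtain ⟨d2, hd2, heq⟩ := List.mem_map.1 hy2
      exact hcancel d1 d2 k1 k2 hlt hd1 heq.symm
  · intro y hy b hb heq
    subst heq
    obtain ⟨k, _, hmem⟩ := List.mem_flatMap.1 hb
    obtain ⟨d, hd, heq2⟩ := List.mem_map.1 hmem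
    apply hnotp y hy
    rw [← heq2]
    exact Dvd.dvd.mul_left (dvd_pow_self p (by omega)) d

theorem pvGenStep_spec (p e M : Nat) (hp : p.Prime) (hpM : ¬ p ∣ M)
    (init : List Nat) (hinit : ∀ x, x ∈ init ↔ x ∣ M) (hnd : init.Nodup) :
    ∃ ds : List Nat, pvGenStep (pvC init) (p : Int) (e : Int) = pvC ds ∧
      (∀ x, x ∈ ds ↔ x ∣ M * p ^ e) ∧ ds.Nodup := by
  refine ⟨pvD init p e, ?_, mem_pvD init p e M hp hinit,
    nodup_pvD init p e M hp hpM (fun x hx => (hinit x).1 hx) hnd⟩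
  unfold pvGenStep
  rw [Int.toNat_natCast]
  exact congrArg Prod.fst (pvGenStep_fold init p e)

theorem pvGen_fold_spec :
    ∀ (fs : List (Nat × Nat)) (M : Nat) (init : List Nat),
      (∀ pe ∈ fs, pe.1.Prime) → (fs.map Prod.fst).Nodup → (∀ pe ∈ fs, ¬ pe.1 ∣ M) →
      (∀ x, x ∈ init ↔ x ∣ M) → init.Nodup →
      ∃ ds : List Nat,
        (pvLift fs).foldl (fun divs pe => pvGenStep divs pe.1 pe.2) (pvC init) = pvC ds ∧
        (∀ x, x ∈ ds ↔ x ∣ M * pvProdPow fs) ∧ ds.Nodup := by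
  intro fs
  induction fs with
  | nil =>
    intro M init _ _ _ hinit hnd
    exact ⟨init, by simp [pvLift], by simpa [pvProdPow] using hinit, hnd⟩
  | cons pe tl ih =>
    intro M init hprime hnd hndvd hinit hndup
    obtain ⟨p, e⟩ := pe
    have hp : p.Prime := hprime (p, e) List.mem_cons_self
    obtain ⟨ds1, hstep, hmem1, hnd1⟩ :=
      pvGenStep_spec p e M hp (hndvd (p, e) List.mem_cons_self) init hinit hndup
    have hpne : ∀ q ∈ tl, q.1 ≠ p := by
      intro q hq
      have : p ∉ tl.map Prod.fst := (List.nodup_cons.1 (by simpa using hnd)).1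
      exact fun heq => this (heq ▸ List.mem_map_of_mem hq)
    have htl_ndvd : ∀ q ∈ tl, ¬ q.1 ∣ M * p ^ e := by
      intro q hq hdvd
      have hqp : q.1.Prime := hprime q (List.mem_cons_of_mem _ hq)
      rcases (Nat.Prime.dvd_mul hqp).1 hdvd with h | h
      · exact hndvd q (List.mem_cons_of_mem _ hq) h
      · exact hpne q hq ((Nat.prime_dvd_prime_iff_eq hqp hp).1 (hqp.dvd_of_dvd_pow h))
    obtain ⟨ds, hfold, hmem, hndf⟩ :=
      ih (M * p ^ e) ds1 (fun q hq => hprime q (List.mem_cons_of_mem _ hq))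
        (List.nodup_cons.1 (by simpa using hnd)).2 htl_ndvd hmem1 hnd1
    refine ⟨ds, ?_, ?_, hndf⟩
    · simp only [pvLift, List.map_cons, List.foldl_cons]
      rw [show pvGenStep (pvC init) ((p : Nat) : Int) ((e : Nat) : Int) = pvC ds1 from hstep]
      exact hfold
    · intro x
      rw [hmem x]
      simp only [pvProdPow, List.map_cons, List.prod_cons]
      rw [mul_assoc]

-- ===== B-side lemmas =====

-- B's chain loop: the dict it builds is the fold of the factor list it discovers
theorem pvChain_spec (spf : List Int) (N0 : Nat)
    (hv : ∀ m, 2 ≤ m → m ∣ N0 →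
      m < spf.length ∧ spf.getD m 0 = ((Nat.minFac m : Nat) : Int)) :
    ∀ (fuel N : Nat) (cnt : PySem.Dict Int Int), 1 ≤ N → N < fuel → N ∣ N0 →
      ∃ facs : List Nat,
        pvChain fuel (N : Int) spf cnt =
          some ((pvC facs).foldl (fun d x => d.insert x (d.getD x 0 + 1)) cnt) ∧
        facs.prod = N ∧ ∀ q ∈ facs, q.Prime := by
  intro fuel
  induction fuel with
  | zero => intro N cnt h1 h2; omega
  | succ f ih =>
    intro N cnt h1 h2 hdvd0
    by_cases hN : 2 ≤ N
    · have hlt : (1 : Int) < (N : Int) := by exact_mod_cast hN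
      obtain ⟨hlen', hval⟩ := hv N hN hdvd0
      set p := N.minFac with hpdef
      have hpp : p.Prime := Nat.minFac_prime (by omega)
      have hget : PySem.List.pyGet? spf ((N : Nat) : Int) = some ((p : Nat) : Int) := by
        rw [PySem.List.pyGet?_natCast, List.getElem?_eq_getElem hlen']
        rw [← List.getD_eq_getElem spf 0 hlen', hval]
      have hpdvd : p ∣ N := Nat.minFac_dvd N
      have hple : p ≤ N := Nat.le_of_dvd (by omega) hpdvd
      have h1' : 1 ≤ N / p := (Nat.one_le_div_iff hpp.pos).2 hple
      have h2' : N / p < f := by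
        have := Nat.div_lt_self (show 0 < N by omega) hpp.one_lt
        omega
      obtain ⟨facs', hrec, hprod, hmem⟩ :=
        ih (N / p) (cnt.insert (p : Int) (cnt.getD (p : Int) 0 + 1)) h1' h2'
          ((Nat.div_dvd_of_dvd hpdvd).trans hdvd0)
      refine ⟨p :: facs', ?_, ?_, ?_⟩
      · have hp0 : ((p : Int)) ≠ 0 := by
          have := hpp.two_le; positivity
        have hfd : PySem.Int.floordiv ((N : Nat) : Int) ((p : Nat) : Int) = ((N / p : Nat) : Int) :=
          PySem.Int.floordiv_natCast N p
        simp only [pvChain, if_pos hlt, hget, if_neg hp0, hfd, hrec]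
        simp [pvC]
      · rw [List.prod_cons, hprod, Nat.mul_div_cancel' hpdvd]
      · intro q hq
        rcases List.mem_cons.1 hq with h | h
        · exact h ▸ hpp
        · exact hmem q h
    · have hN1 : N = 1 := by omega
      subst hN1
      exact ⟨[], by simp [pvChain, pvC], by simp, by simp⟩

-- a 'good' pes: distinct keys, each pair a cast of a prime with a positive exponent
def pvGoodP (pes : List (Int × Int)) : Prop :=
  (pes.map Prod.fst).Nodup ∧
    ∀ pe ∈ pes, ∃ (pN eN : Nat), pe = ((pN : Int), (eN : Int)) ∧ pN.Prime ∧ 1 ≤ eN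

def pvMprod (pes : List (Int × Int)) : Int :=
  (pes.map (fun pe => pe.1 ^ pe.2.toNat)).prod

theorem pvMprod_cast (pes : List (Int × Int))
    (h : ∀ pe ∈ pes, ∃ (pN eN : Nat), pe = ((pN : Int), (eN : Int)) ∧ pN.Prime ∧ 1 ≤ eN) :
    ∃ MN : Nat, pvMprod pes = (MN : Int) ∧ 1 ≤ MN ∧
      ∀ q : Nat, q.Prime → q ∣ MN → ((q : Int)) ∈ pes.map Prod.fst := by
  induction pes with
  | nil =>
    refine ⟨1, by simp [pvMprod], le_refl 1, ?_⟩
    intro q hq hdvd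
    exact absurd (Nat.dvd_one.1 hdvd) hq.one_lt.ne'
  | cons pe tl ih =>
    obtain ⟨MN', hM', hM1', hMq'⟩ := ih (fun x hx => h x (List.mem_cons_of_mem _ hx))
    obtain ⟨pN, eN, hpe, hpp, he1⟩ := h pe List.mem_cons_self
    refine ⟨pN ^ eN * MN', ?_, ?_, ?_⟩
    · simp only [pvMprod, List.map_cons, List.prod_cons] at *
      rw [hpe]
      simp only [Int.toNat_natCast]
      rw [hM']
      push_cast
      ring
    · exact Nat.mul_pos (pow_pos hpp.pos eN) hM1'
    · intro q hq hdvd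
      rcases (Nat.Prime.dvd_mul hq).1 hdvd with hcase | hcase
      · have : q = pN :=
          (Nat.prime_dvd_prime_iff_eq hq hpp).1 (hq.dvd_of_dvd_pow hcase)
        subst this
        simp [hpe]
      · exact List.mem_cons_of_mem _ (hMq' q hq hcase)

-- positive divisors of A * p^e split uniquely into a power of p times a divisor of A
theorem pvSplit (p e A : Nat) (hp : p.Prime) (hA : 1 ≤ A) (x : Int) :
    (1 ≤ x ∧ x ∣ ((A * p ^ e : Nat) : Int)) ↔
      ∃ k : Nat, k ≤ e ∧ ∃ d : Int, (1 ≤ d ∧ d ∣ ((A : Nat) : Int)) ∧ x = ((p ^ k : Nat) : Int) * d := by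
  constructor
  · rintro ⟨hx1, hdvd⟩
    have hx : x = ((x.toNat : Nat) : Int) := by omega
    have hdn : x.toNat ∣ A * p ^ e := by exact_mod_cast hx ▸ hdvd
    obtain ⟨b, c, hb, hc, habc⟩ := exists_dvd_and_dvd_of_dvd_mul hdn
    obtain ⟨k, hk, rfl⟩ := (Nat.dvd_prime_pow hp).1 hc
    have hb1 : 1 ≤ b := Nat.pos_of_dvd_of_pos hb (by omega)
    refine ⟨k, hk, ((b : Nat) : Int), ⟨by exact_mod_cast hb1, by exact_mod_cast hb⟩, ?_⟩
    rw [hx, habc]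
    push_cast
    ring
  · rintro ⟨k, hk, d, ⟨hd1, hdvd⟩, rfl⟩
    constructor
    · have hpk : (1 : Int) ≤ ((p ^ k : Nat) : Int) := by
        exact_mod_cast Nat.one_le_iff_ne_zero.2 (pow_ne_zero _ hp.pos.ne')
      nlinarith
    · have h1 : ((p ^ k : Nat) : Int) ∣ ((p ^ e : Nat) : Int) := by
        exact_mod_cast pow_dvd_pow p hk
      have heq : ((A * p ^ e : Nat) : Int) = ((p ^ e : Nat) : Int) * ((A : Nat) : Int) := by
        push_cast; ring
      rw [heq]
      exact mul_dvd_mul h1 hdvd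

-- a positive divisor of a positive cast is not divisible by a prime not dividing it
theorem pvNotDvd (pN MN : Nat) (d : Int) (hd1 : 1 ≤ d)
    (hdvd : d ∣ ((MN : Nat) : Int)) (hnd : ¬ pN ∣ MN) : ¬ ((pN : Int)) ∣ d := by
  intro hpd
  apply hnd
  have hd : d = ((d.toNat : Nat) : Int) := by omega
  have h1 : pN ∣ d.toNat := by exact_mod_cast hd ▸ hpd
  have h2 : d.toNat ∣ MN := by exact_mod_cast hd ▸ hdvd
  exact h1.trans h2

-- B's DFS: appends exactly the products P·d with d a positive divisor of pvMprod pes, in [2, L]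
theorem pvGo_spec (L : Int) :
    ∀ (pes : List (Int × Int)), pvGoodP pes → ∀ (P : Int) (ds : List Int), 1 ≤ P →
      ∃ out, pvGo L pes P ds = ds ++ out ∧
        (∀ x, x ∈ out ↔ (2 ≤ x ∧ x ≤ L ∧ ∃ d, (1 ≤ d ∧ d ∣ pvMprod pes) ∧ x = P * d)) ∧
        out.Nodup := by
  intro pes
  induction pes with
  | nil =>
    intro _ P ds hP
    by_cases hL : L < P
    · refine ⟨[], by simp [pvGo, if_pos hL], ?_, by simp⟩
      intro x
      simp only [List.not_mem_nil, false_iff]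
      rintro ⟨_, hxL, d, ⟨hd1, hdvd⟩, rfl⟩
      have : d = 1 := by
        rcases Int.isUnit_iff.1 (isUnit_of_dvd_one (by simpa [pvMprod] using hdvd)) with h | h
        · exact h
        · omega
      subst this
      omega
    · by_cases h2 : 2 ≤ P
      · refine ⟨[P], by simp [pvGo, if_neg hL, if_pos h2], ?_, by simp⟩
        intro x
        simp only [List.mem_singleton]
        constructor
        · rintro rfl
          exact ⟨h2, by omega, 1, ⟨le_refl 1, one_dvd _⟩, by ring⟩
        · rintro ⟨_, _, d, ⟨hd1, hdvd⟩, rfl⟩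
          have : d = 1 := by
            rcases Int.isUnit_iff.1 (isUnit_of_dvd_one (by simpa [pvMprod] using hdvd)) with h | h
            · exact h
            · omega
          subst this; ring
      · refine ⟨[], by simp [pvGo, if_neg h2], ?_, by simp⟩
        intro x
        simp only [List.not_mem_nil, false_iff]
        rintro ⟨hx2, _, d, ⟨hd1, hdvd⟩, rfl⟩
        have : d = 1 := by
          rcases Int.isUnit_iff.1 (isUnit_of_dvd_one (by simpa [pvMprod] using hdvd)) with h | h
          · exact h
          · omega
        subst this
        simp at hx2
        omega
  | cons pe tl ih =>
    rintro ⟨hnd, hgood⟩ P ds hP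
    obtain ⟨pN, eN, hpe, hpp, he1⟩ := hgood pe List.mem_cons_self
    subst hpe
    rw [List.map_cons, List.nodup_cons] at hnd
    obtain ⟨hnp0, hndtl⟩ := hnd
    have hgoodtl : pvGoodP tl :=
      ⟨hndtl, fun x hx => hgood x (List.mem_cons_of_mem _ hx)⟩
    obtain ⟨MN', hM', hM1', hMq'⟩ :=
      pvMprod_cast tl (fun x hx => hgood x (List.mem_cons_of_mem _ hx))
    have hpM' : ¬ pN ∣ MN' := fun hdvd => hnp0 (hMq' pN hpp hdvd)
    by_cases hL : L < P
    · refine ⟨[], by simp [pvGo, if_pos hL], ?_, by simp⟩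
      intro x
      simp only [List.not_mem_nil, false_iff]
      rintro ⟨hx2, hxL, d, ⟨hd1, hdvd⟩, rfl⟩
      nlinarith
    · -- the foldl over k = 0 .. eN: inner induction on the range bound
      have hinner : ∀ j : Nat,
          ∃ out, (PySem.List.pyRange 0 (j : Int) 1).foldl
              (fun acc k => pvGo L tl (P * ((pN : Int)) ^ k.toNat) acc) ds = ds ++ out ∧
            (∀ x, x ∈ out ↔ (2 ≤ x ∧ x ≤ L ∧ ∃ k : Nat, k < j ∧ ∃ d,
              (1 ≤ d ∧ d ∣ ((MN' : Nat) : Int)) ∧ x = P * (((pN ^ k : Nat) : Int) * d))) ∧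
            out.Nodup := by
        intro j
        induction j with
        | zero =>
          refine ⟨[], by simp [PySem.List.pyRange_one_eq_nil], ?_, by simp⟩
          intro x
          simp only [List.not_mem_nil, false_iff]
          rintro ⟨_, _, k, hk, _⟩
          omega
        | succ j ihj =>
          obtain ⟨outj, hfold, hmemj, hndj⟩ := ihj
          have hPk : (1 : Int) ≤ P * ((pN : Int)) ^ ((j : Int)).toNat := by
            have h1 : (1 : Int) ≤ ((pN : Int)) ^ ((j : Int)).toNat :=
              one_le_pow₀ (by exact_mod_cast hpp.one_le)
            nlinarith
          obtain ⟨out', hgo, hmem', hnd'⟩ :=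
            ih hgoodtl (P * ((pN : Int)) ^ ((j : Int)).toNat) (ds ++ outj) hPk
          have hrange : PySem.List.pyRange 0 ((j : Nat) + 1 : Int) 1 =
              PySem.List.pyRange 0 (j : Int) 1 ++ [(j : Int)] :=
            PySem.List.pyRange_one_succ_right (by exact_mod_cast Nat.zero_le j)
          refine ⟨outj ++ out', ?_, ?_, ?_⟩
          · rw [show ((j : Nat) + 1 : Int) = ((j + 1 : Nat) : Int) by push_cast; ring] at *
            rw [show PySem.List.pyRange 0 ((j + 1 : Nat) : Int) 1 =
                PySem.List.pyRange 0 (j : Int) 1 ++ [(j : Int)] by exact_mod_cast hrange]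
            rw [List.foldl_append, hfold]
            simp only [List.foldl_cons, List.foldl_nil]
            rw [hgo, List.append_assoc]
          · intro x
            simp only [List.mem_append]
            rw [hmemj x, hmem' x]
            constructor
            · rintro (⟨h2, hxL, k, hk, d, hd, rfl⟩ | ⟨h2, hxL, d, hd, rfl⟩)
              · exact ⟨h2, hxL, k, by omega, d, hd, rfl⟩
              · refine ⟨h2, hxL, j, by omega, d, by rwa [hM'] at hd, ?_⟩
                rw [Int.toNat_natCast]
                push_cast
                ring
            · rintro ⟨h2, hxL, k, hk, d, hd, rfl⟩
              by_cases hkj : k < j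
              · exact Or.inl ⟨h2, hxL, k, hkj, d, hd, rfl⟩
              · have hkj' : k = j := by omega
                subst hkj'
                refine Or.inr ⟨h2, hxL, d, by rwa [hM'], ?_⟩
                rw [Int.toNat_natCast]
                push_cast
                ring
          · rw [List.nodup_append]
            refine ⟨hndj, hnd', ?_⟩
            intro y hy1 b hb heq0
            subst heq0
            obtain ⟨_, _, k, hk, d, ⟨hd1, hdvd⟩, hy⟩ := (hmemj y).1 hy1
            obtain ⟨_, _, d', ⟨hd1', hdvd'⟩, hy'⟩ := (hmem' y).1 hb
            rw [hM'] at hdvd'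
            -- P p^k d = P p^j d' with k < j forces pN ∣ d, impossible
            have hPne : P ≠ 0 := by omega
            have heq : ((pN ^ k : Nat) : Int) * d = ((pN : Int)) ^ ((j : Int)).toNat * d' := by
              have h2 := hy.symm.trans hy'
              rw [mul_assoc] at h2
              exact mul_left_cancel₀ hPne h2
            have hpk0 : ((pN ^ k : Nat) : Int) ≠ 0 := by
              exact_mod_cast pow_ne_zero k hpp.pos.ne'
            have hfac : d = ((pN ^ (j - k) : Nat) : Int) * d' := by
              apply mul_left_cancel₀ hpk0
              rw [heq, Int.toNat_natCast]
              push_cast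
              rw [← mul_assoc, ← pow_add]
              congr 2
              omega
            have hpdvd : ((pN : Int)) ∣ d := by
              rw [hfac]
              exact Dvd.dvd.mul_right (by exact_mod_cast dvd_pow_self pN (by omega : j - k ≠ 0)) d'
            exact pvNotDvd pN MN' d hd1 hdvd hpM' hpdvd
      obtain ⟨out, hfold, hmem, hndout⟩ := hinner (eN + 1)
      refine ⟨out, ?_, ?_, hndout⟩
      · have : pvGo L (((pN : Int), (eN : Int)) :: tl) P ds =
            (PySem.List.pyRange 0 ((eN : Int) + 1) 1).foldl
              (fun acc k => pvGo L tl (P * ((pN : Int)) ^ k.toNat) acc) ds := by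
          simp [pvGo, if_neg hL]
        rw [this, show ((eN : Int) + 1) = ((eN + 1 : Nat) : Int) by push_cast; ring, hfold]
      · intro x
        rw [hmem x]
        constructor
        · rintro ⟨h2, hxL, k, hk, d, hd, rfl⟩
          refine ⟨h2, hxL, ((pN ^ k : Nat) : Int) * d, ?_, rfl⟩
          have := (pvSplit pN eN MN' hpp hM1' (((pN ^ k : Nat) : Int) * d)).2
            ⟨k, by omega, d, hd, rfl⟩
          refine ⟨this.1, ?_⟩
          have hMeq : pvMprod (((pN : Int), (eN : Int)) :: tl) = ((MN' * pN ^ eN : Nat) : Int) := by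
            have hM'' : (List.map (fun pe : Int × Int => pe.1 ^ pe.2.toNat) tl).prod
                = ((MN' : Nat) : Int) := by simpa [pvMprod] using hM'
            simp only [pvMprod, List.map_cons, List.prod_cons, Int.toNat_natCast]
            rw [hM'']
            push_cast
            ring
          rw [hMeq]
          exact this.2
        · rintro ⟨h2, hxL, d, ⟨hd1, hdvd⟩, rfl⟩
          have hMeq : pvMprod (((pN : Int), (eN : Int)) :: tl) = ((MN' * pN ^ eN : Nat) : Int) := by
            have hM'' : (List.map (fun pe : Int × Int => pe.1 ^ pe.2.toNat) tl).prod
                = ((MN' : Nat) : Int) := by simpa [pvMprod] using hM'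
            simp only [pvMprod, List.map_cons, List.prod_cons, Int.toNat_natCast]
            rw [hM'']
            push_cast
            ring
          rw [hMeq] at hdvd
          obtain ⟨k, hk, d', hd', rfl⟩ := (pvSplit pN eN MN' hpp hM1' d).1 ⟨hd1, hdvd⟩
          exact ⟨h2, hxL, k, by omega, d', hd', rfl⟩

theorem pv_main (n : Int) (spf : List Int) (hpre : Pre_compute_ds_upto_sqrt n spf) :
    compute_ds_upto_sqrt n spf = compute_ds_upto_sqrt_alt n spf := by
  obtain ⟨h0, hcase⟩ := hpre
  by_cases hlt2 : n < 2
  · have h01 : n = 0 ∨ n = 1 := by omega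
    rcases h01 with rfl | rfl <;>
      simp [compute_ds_upto_sqrt, compute_ds_upto_sqrt_alt, pvFactLoop, pvGenDivisors,
        PySem.List.sorted, pvGenStep, pvChain, pvGo, PySem.Dict.empty]
  · obtain ⟨hlen, htab⟩ := hcase.resolve_left hlt2
    have hN2 : 2 ≤ n.toNat := by omega
    set N := n.toNat with hNdef
    have hn : n = (N : Int) := by omega
    have hNlen : N < spf.length := by exact_mod_cast hn ▸ hlen
    have hv : ∀ m, 2 ≤ m → m ∣ N →
        m < spf.length ∧ spf.getD m 0 = ((Nat.minFac m : Nat) : Int) := by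
      intro m hm2 hmdvd
      have hmlen : m < spf.length := lt_of_le_of_lt (Nat.le_of_dvd (by omega) hmdvd) hNlen
      have hok := htab m hmlen hm2 hmdvd
      simp only [pvEntryOk, Bool.and_eq_true, decide_eq_true_eq] at hok
      obtain ⟨⟨⟨hml, h2p⟩, hdvd⟩, hmin⟩ := hok
      refine ⟨hmlen, ?_⟩
      have hmfle : m.minFac ≤ (spf.getD m 0).toNat :=
        Nat.minFac_le_of_dvd (by omega) hdvd
      have hmf2 : 2 ≤ m.minFac := (Nat.minFac_prime (by omega : m ≠ 1)).two_le
      have hnlt : ¬ (m.minFac < (spf.getD m 0).toNat) :=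
        fun hlt => hmin _ hlt hmf2 (Nat.minFac_dvd m)
      omega
    obtain ⟨fs, hfact, hprod, hmem, hnd⟩ :=
      pvFactLoop_spec spf N hv (N + 1) N [] (by omega) (by omega) (dvd_refl N)
    obtain ⟨ds, hfold, hdsmem, hdsnd⟩ :=
      pvGen_fold_spec fs 1 [1] (fun pe h => (hmem pe h).1) hnd
        (fun pe h hdvd => ((hmem pe h).1.one_lt.ne' (Nat.dvd_one.1 hdvd)))
        (by intro x; simp [Nat.dvd_one]) (by simp)
    have hdsmem' : ∀ x, x ∈ ds ↔ x ∣ N := by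
      intro x; rw [hdsmem x, one_mul, hprod]
    set L : Int := ((Nat.sqrt N : Nat) : Int) with hLdef
    -- B's side: the chain builds the counter of the prime factor list facs
    obtain ⟨facs, hchain, hfprod, hfprime⟩ :=
      pvChain_spec spf N hv (N + 1) N PySem.Dict.empty (by omega) (by omega) (dvd_refl N)
    set S : List Int := PySem.Set.ofList (pvC facs) with hS
    set pes : List (Int × Int) := S.map (fun k => (k, ((pvC facs).count k : Int))) with hpesdef
    have hpes : ((pvC facs).foldl (fun d x => d.insert x (d.getD x 0 + 1))
        PySem.Dict.empty).items = pes := by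
      rw [PySem.Dict.foldl_insert_getD_add_one_eq_counter, PySem.Dict.items_counter]
    have hkeys : pes.map Prod.fst = S := by
      rw [hpesdef, List.map_map]
      have hco : (Prod.fst ∘ fun k : Int => (k, ((pvC facs).count k : Int))) = id := rfl
      rw [hco, List.map_id]
    have hcount : ∀ q : Nat, (pvC facs).count ((q : Nat) : Int) = facs.count q := by
      intro q
      exact List.count_map_of_injective facs Int.ofNat
        (fun a b hab => by simpa using hab) q
    have hgood : pvGoodP pes := by
      constructor
      · rw [hkeys]; exact PySem.Set.nodup_ofList _
      · rintro ⟨k, c⟩ hkc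
        rw [hpesdef] at hkc
        obtain ⟨k', hk', hk'eq⟩ := List.mem_map.1 hkc
        have hk1 : k' = k := congrArg Prod.fst hk'eq
        subst hk1
        have hc : c = ((pvC facs).count k' : Int) := (congrArg Prod.snd hk'eq).symm
        subst hc
        have hkmem : k' ∈ pvC facs := (PySem.Set.mem_ofList _ _).1 hk'
        obtain ⟨q, hq, rfl⟩ := (mem_pvC facs k').1 hkmem
        exact ⟨q, facs.count q, by rw [hcount q], hfprime q hq, List.count_pos_iff.2 hq⟩
    have hM : pvMprod pes = ((N : Nat) : Int) := by
      rw [pvMprod, hpesdef, List.map_map]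
      have hstep : (S.map ((fun pe => pe.1 ^ pe.2.toNat) ∘
          (fun k => (k, ((pvC facs).count k : Int))))).prod =
          (S.map (fun k => k ^ (pvC facs).count k)).prod := rfl
      rw [hstep]
      have hSnd : S.Nodup := PySem.Set.nodup_ofList _
      have hfin : S.toFinset = (pvC facs).toFinset := by
        ext a
        simp only [List.mem_toFinset]
        exact PySem.Set.mem_ofList _ _
      calc (S.map (fun k => k ^ (pvC facs).count k)).prod
          = S.toFinset.prod (fun k => k ^ (pvC facs).count k) :=
            (List.prod_toFinset _ hSnd).symm
        _ = (pvC facs).toFinset.prod (fun k => k ^ (pvC facs).count k) := by rw [hfin]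
        _ = (pvC facs).prod := (Finset.prod_list_count (pvC facs)).symm
        _ = ((facs.prod : Nat) : Int) := by
            simp only [pvC, Nat.cast_list_prod]
            rfl
        _ = ((N : Nat) : Int) := by rw [hfprod]
    obtain ⟨out, hgo, hout, houtnd⟩ := pvGo_spec L pes hgood 1 [] (le_refl 1)
    rw [List.nil_append] at hgo
    have hout' : ∀ x, x ∈ out ↔ (2 ≤ x ∧ x ≤ L ∧ x ∣ ((N : Nat) : Int)) := by
      intro x
      rw [hout x]
      constructor
      · rintro ⟨h2, hxL, d, ⟨hd1, hdvd⟩, rfl⟩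
        rw [hM] at hdvd
        exact ⟨by omega, by omega, by simpa using hdvd⟩
      · rintro ⟨h2, hxL, hdvd⟩
        exact ⟨h2, hxL, x, ⟨by omega, by rwa [hM]⟩, by ring⟩
    -- the two filtered lists hold the same elements, both without duplicates
    have hiff : ∀ x : Int,
        x ∈ (pvC ds).filter (fun d => decide (2 ≤ d ∧ d ≤ L)) ↔ x ∈ out := by
      intro x
      rw [hout' x]
      simp only [List.mem_filter, mem_pvC, decide_eq_true_eq]
      constructor
      · rintro ⟨⟨y, hy, rfl⟩, h2, hL⟩
        have hyd : y ∣ N := (hdsmem' y).1 hy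
        exact ⟨h2, hL, by exact_mod_cast hyd⟩
      · rintro ⟨h2, hL, hdvd⟩
        have hx : x = ((x.toNat : Nat) : Int) := by omega
        refine ⟨⟨x.toNat, ?_, by omega⟩, h2, hL⟩
        apply (hdsmem' x.toNat).2
        exact_mod_cast hx ▸ hdvd
    have hperm : ((pvC ds).filter (fun d => decide (2 ≤ d ∧ d ≤ L))).Perm out := by
      apply List.perm_of_nodup_nodup_toFinset_eq
      · exact (nodup_pvC ds hdsnd).filter _
      · exact houtnd
      · ext a; simp only [List.mem_toFinset]; exact hiff a
    have hsorted :
        PySem.List.sorted ((pvC ds).filter (fun d => decide (2 ≤ d ∧ d ≤ L))) (fun x => x) false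
          = PySem.List.sorted out (fun x => x) false :=
      PySem.List.sorted_eq_sorted_of_perm _ _ (fun x => x) (fun a b h => h) hperm
    -- unfold both ports
    show (let Lv : Int := (Nat.sqrt n.toNat : Int);
      match pvFactLoop (n.toNat + 1) n spf [] with
      | none => (([] : List Int), Lv)
      | some fsv =>
        let divs := pvGenDivisors fsv
        let dsv := divs.foldl (fun ds d => if 2 ≤ d ∧ d ≤ Lv then ds ++ [d] else ds) []
        (PySem.List.sorted dsv (fun x => x) false, Lv)) = _
    rw [hn]
    rw [Int.toNat_natCast, hfact]
    simp only [List.nil_append]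
    show (PySem.List.sorted
        ((pvGenDivisors (pvLift fs)).foldl
          (fun ds d => if 2 ≤ d ∧ d ≤ L then ds ++ [d] else ds) [])
        (fun x => x) false, L) = _
    have hgen : pvGenDivisors (pvLift fs) = pvC ds := by
      unfold pvGenDivisors
      rw [show ([(1 : Int)]) = pvC [1] from rfl]
      exact hfold
    rw [hgen, PySem.List.foldl_append_ite_eq_filter (fun d => 2 ≤ d ∧ d ≤ L), List.nil_append,
      hsorted]
    unfold compute_ds_upto_sqrt_alt
    simp only [Int.toNat_natCast]
    rw [hchain]
    show (PySem.List.sorted out (fun x => x) false, L) =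
      (PySem.List.sorted (pvGo L (((pvC facs).foldl (fun d x => d.insert x (d.getD x 0 + 1))
        PySem.Dict.empty).items) 1 []) (fun x => x) false, L)
    rw [hpes, hgo]

-- ===== VERDICT (by name: the statement is the Claim_ definition above) =====
theorem compute_ds_upto_sqrt_spec : Claim_equal_compute_ds_upto_sqrt := by
  intro n spf _ hpre
  unfold Spec_compute_ds_upto_sqrt
  exact pv_main n spf hpre
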